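-- pv_equiv track=rewrite | github.com/Tech-Shrey/DDRGen_AI | structurer.py | map_thermal_to_areas
-- ===== SOURCE A (Python) =====
-- def map_thermal_to_areas(thermal_records: list, num_areas: int) -> dict:
--     """
--     Distribute thermal scans evenly across inspection areas.
--     Since we have 30 scans and 7 areas, each area gets ~4 scans.
--     Returns dict: {area_number: [thermal_record, ...]}
--     """
--     mapping = {}
--     scans_per_area = max(1, len(thermal_records) // num_areas)
--
--     for i in range(num_areas):
--         start = i * scans_per_area
--         end   = start + scans_per_area if i < num_areas - 1 else len(thermal_records)
--         mapping[i + 1] = thermal_records[start:end]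
--
--     return mapping
-- ===== SOURCE B (Python) =====
-- def map_thermal_to_areas(thermal_records: list, num_areas: int) -> dict:
--     """
--     Distribute thermal scans evenly across inspection areas.
--     Returns dict: {area_number: [thermal_record, ...]}
--     """
--     scans_per_area = max(1, len(thermal_records) // num_areas)
--     mapping = {i + 1: [] for i in range(num_areas)}
--     if num_areas > 0:
--         for j, record in enumerate(thermal_records):
--             bucket = min(j // scans_per_area, num_areas - 1)
--             mapping[bucket + 1].append(record)
--     return mapping
-- ===== Notes on version B (the rewrite author's own statement) =====
-- stated objective: alternative
-- what changed: Replaces A's loop over area slices (one slice of the record list per area) with a pre-initialized bucket dict and a single pass over the records that computes each record's bucket as min(j // scans_per_area, num_areas - 1).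
import Mathlib
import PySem

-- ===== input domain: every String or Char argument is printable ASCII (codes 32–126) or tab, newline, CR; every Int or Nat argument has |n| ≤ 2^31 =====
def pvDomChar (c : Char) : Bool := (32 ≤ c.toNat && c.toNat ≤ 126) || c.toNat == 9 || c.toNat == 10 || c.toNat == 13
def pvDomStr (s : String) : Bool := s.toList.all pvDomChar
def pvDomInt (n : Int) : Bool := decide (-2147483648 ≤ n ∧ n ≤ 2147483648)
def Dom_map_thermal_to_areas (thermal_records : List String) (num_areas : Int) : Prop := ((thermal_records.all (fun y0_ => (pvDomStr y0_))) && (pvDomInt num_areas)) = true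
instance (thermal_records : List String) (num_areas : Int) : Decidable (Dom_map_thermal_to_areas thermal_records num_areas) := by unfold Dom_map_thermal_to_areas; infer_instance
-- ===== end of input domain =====

-- B replaces A's loop over area slices by one pass over the records that buckets each record
-- by its index (alternative decomposition, same cost).

-- ===== PORT A =====
def map_thermal_to_areas (thermal_records : List String) (num_areas : Int) : List (Int × List String) :=
  let scans_per_area := max 1 (PySem.Int.floordiv (thermal_records.length : Int) num_areas)
  let mapping : PySem.Dict Int (List String) :=
    (PySem.List.pyRange 0 num_areas 1).foldl (fun d i =>
      let start := i * scans_per_area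
      let e := if i < num_areas - 1 then start + scans_per_area else (thermal_records.length : Int)
      d.insert (i + 1) (PySem.List.slice thermal_records (some start) (some e)))
      PySem.Dict.empty
  mapping.items

-- ===== PORT B =====
def map_thermal_to_areas_alt (thermal_records : List String) (num_areas : Int) : List (Int × List String) :=
  let scans_per_area := max 1 (PySem.Int.floordiv (thermal_records.length : Int) num_areas)
  let mapping : PySem.Dict Int (List String) :=
    (PySem.List.pyRange 0 num_areas 1).foldl (fun d i => d.insert (i + 1) ([] : List String)) PySem.Dict.empty
  let mapping :=
    if 0 < num_areas then
      (PySem.List.enumerate thermal_records 0).foldl (fun d p =>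
        d.modify (min (PySem.Int.floordiv p.1 scans_per_area) (num_areas - 1) + 1) []
          (fun v => v ++ [p.2])) mapping
    else mapping
  mapping.items

-- ===== PRECONDITION & SPEC =====
-- Pre_ excludes exactly num_areas = 0, where A raises ZeroDivisionError (B raises there too).
def Pre_map_thermal_to_areas (thermal_records : List String) (num_areas : Int) : Prop := num_areas ≠ 0
instance (thermal_records : List String) (num_areas : Int) : Decidable (Pre_map_thermal_to_areas thermal_records num_areas) := by unfold Pre_map_thermal_to_areas; infer_instance
def pvWitness_map_thermal_to_areas : List String × Int := (["a", "b", "c"], 2)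
def Spec_map_thermal_to_areas (thermal_records : List String) (num_areas : Int) (out : List (Int × List String)) : Prop := out = map_thermal_to_areas_alt thermal_records num_areas
instance (thermal_records : List String) (num_areas : Int) (out : List (Int × List String)) : Decidable (Spec_map_thermal_to_areas thermal_records num_areas out) := by unfold Spec_map_thermal_to_areas; infer_instance

-- ===== CLAIM (what is proved, stated in full; the proofs are below) =====
def Claim_equal_map_thermal_to_areas : Prop := ∀ (thermal_records : List String) (num_areas : Int), Dom_map_thermal_to_areas thermal_records num_areas → Pre_map_thermal_to_areas thermal_records num_areas → Spec_map_thermal_to_areas thermal_records num_areas (map_thermal_to_areas thermal_records num_areas)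

-- ===== LEMMAS AND PROOFS =====

-- every index produced by enumerate lies in [s0, s0 + xs.length)
theorem pv_mem_enumerate_bounds {α : Type} (xs : List α) (s0 : Int) (p : Int × α)
    (hp : p ∈ PySem.List.enumerate xs s0) : s0 ≤ p.1 ∧ p.1 < s0 + xs.length := by
  induction xs generalizing s0 with
  | nil => simp [PySem.List.enumerate_nil] at hp
  | cons x xs ih =>
    rw [PySem.List.enumerate_cons] at hp
    rcases List.mem_cons.mp hp with h | h
    · subst h; simp
    · have := ih (s0 + 1) h
      simp only [List.length_cons]
      push_cast
      omega

-- filtering enumerate by an index interval is drop/take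
theorem pv_enum_filter_interval {α : Type} (xs : List α) (s0 a b : Int) :
    ((PySem.List.enumerate xs s0).filter (fun p => decide (a ≤ p.1 ∧ p.1 < b))).map (·.2)
      = (xs.drop (a - s0).toNat).take (b - max a s0).toNat := by
  induction xs generalizing s0 with
  | nil => simp [PySem.List.enumerate_nil]
  | cons x xs ih =>
    rw [PySem.List.enumerate_cons]
    by_cases ha : a ≤ s0
    · by_cases hb : s0 < b
      · have h1 : (a - s0).toNat = 0 := by omega
        have h2 : (b - max a s0).toNat = (b - max a (s0 + 1)).toNat + 1 := by omega
        have h3 : (a - (s0 + 1)).toNat = 0 := by omega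
        simp only [List.filter_cons, decide_eq_true_eq]
        rw [if_pos (by exact ⟨ha, hb⟩)]
        simp only [List.map_cons, h1, List.drop_zero, h2, List.take_succ_cons]
        rw [ih (s0 + 1), h3]
        simp
      · have h1 : (b - max a s0).toNat = 0 := by omega
        have h2 : (b - max a (s0 + 1)).toNat = 0 := by omega
        simp only [List.filter_cons, decide_eq_true_eq]
        rw [if_neg (by omega)]
        rw [ih (s0 + 1)]
        simp [h1, h2]
    · have h1 : (a - s0).toNat = (a - (s0 + 1)).toNat + 1 := by omega
      have h2 : max a s0 = max a (s0 + 1) := by omega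
      simp only [List.filter_cons, decide_eq_true_eq]
      rw [if_neg (by omega)]
      rw [ih (s0 + 1), h1, h2]
      simp

-- filtering enumerate by a lower bound on the index is drop
theorem pv_enum_filter_ge {α : Type} (xs : List α) (s0 a : Int) :
    ((PySem.List.enumerate xs s0).filter (fun p => decide (a ≤ p.1))).map (·.2)
      = xs.drop (a - s0).toNat := by
  induction xs generalizing s0 with
  | nil => simp [PySem.List.enumerate_nil]
  | cons x xs ih =>
    rw [PySem.List.enumerate_cons]
    by_cases ha : a ≤ s0
    · have h1 : (a - s0).toNat = 0 := by omega
      have h2 : (a - (s0 + 1)).toNat = 0 := by omega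
      simp only [List.filter_cons, decide_eq_true_eq]
      rw [if_pos ha]
      simp only [List.map_cons]
      rw [ih (s0 + 1), h1, h2]
      simp
    · have h1 : (a - s0).toNat = (a - (s0 + 1)).toNat + 1 := by omega
      simp only [List.filter_cons, decide_eq_true_eq]
      rw [if_neg ha, ih (s0 + 1), h1]
      simp

-- items of a fold of inserts of the fresh distinct keys i+1 over pyRange 0 n 1
theorem pv_items_range_insert (n : Int) (v : Int → List String) :
    ((PySem.List.pyRange 0 n 1).foldl (fun d i => d.insert (i + 1) (v i)) PySem.Dict.empty).items
      = (PySem.List.pyRange 0 n 1).map (fun i => (i + 1, v i)) := by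
  have h := PySem.Dict.items_foldl_insert_fresh (l := PySem.List.pyRange 0 n 1)
      (k := fun i => i + 1) (v := v) (d := (PySem.Dict.empty : PySem.Dict Int (List String)))
      (by intro a _; simp [PySem.Dict.contains_empty])
      (by
        apply List.Nodup.map
        · intro x y hxy; simp only at hxy; omega
        · exact PySem.List.nodup_pyRange_one 0 n)
  simpa using h

-- bucket membership: for a record index j ∈ [0, len) the bucket key lies among the dict's keys
theorem pv_key_mem (n s j : Int) (hn : 0 < n) (hs : 0 < s) (hj : 0 ≤ j) :
    min (PySem.Int.floordiv j s) (n - 1) + 1 ∈ (PySem.List.pyRange 0 n 1).map (fun i => i + 1) := by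
  have h0 : 0 ≤ PySem.Int.floordiv j s := by
    have := (PySem.Int.le_floordiv_iff_mul_le (a := j) (b := s) (q := 0) hs).mpr (by omega)
    omega
  refine List.mem_map.mpr ⟨min (PySem.Int.floordiv j s) (n - 1), ?_, rfl⟩
  rw [PySem.List.mem_pyRange_one]
  omega

-- the per-record bucket test equals the interval test, for a non-last area
theorem pv_pred_interval (n s i j : Int) (hs : 0 < s) (hi : 0 ≤ i) (hlt : i < n - 1) :
    (min (PySem.Int.floordiv j s) (n - 1) + 1 == i + 1) = decide (i * s ≤ j ∧ j < i * s + s) := by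
  have h2 : i ≤ PySem.Int.floordiv j s ↔ i * s ≤ j := PySem.Int.le_floordiv_iff_mul_le hs
  have h3 : PySem.Int.floordiv j s < i + 1 ↔ j < (i + 1) * s := PySem.Int.floordiv_lt_iff_lt_mul hs
  have h4 : (i + 1) * s = i * s + s := by ring
  rw [h4] at h3
  rw [Bool.eq_iff_iff]
  simp only [beq_iff_eq, decide_eq_true_eq]
  rw [← h2, ← h3]
  omega

-- the per-record bucket test equals the lower-bound test, for the last area
theorem pv_pred_last (n s j : Int) (hs : 0 < s) (hn : 0 < n) :
    (min (PySem.Int.floordiv j s) (n - 1) + 1 == (n - 1) + 1) = decide ((n - 1) * s ≤ j) := by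
  have h2 : n - 1 ≤ PySem.Int.floordiv j s ↔ (n - 1) * s ≤ j := PySem.Int.le_floordiv_iff_mul_le hs
  rw [Bool.eq_iff_iff]
  simp only [beq_iff_eq, decide_eq_true_eq]
  rw [← h2]
  omega

-- ===== VERDICT (by name: the statement is the Claim_ definition above) =====
theorem map_thermal_to_areas_spec : Claim_equal_map_thermal_to_areas := by
  intro tr n _ hpre
  unfold Spec_map_thermal_to_areas map_thermal_to_areas map_thermal_to_areas_alt
  simp only []
  by_cases hn : 0 < n
  · rw [if_pos hn]
    set L : Int := (tr.length : Int) with hL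
    set s : Int := max 1 (PySem.Int.floordiv L n) with hsdef
    have hs : 0 < s := by have := le_max_left 1 (PySem.Int.floordiv L n); omega
    set R := PySem.List.pyRange 0 n 1 with hR
    set key : Int × String → Int := fun p => min (PySem.Int.floordiv p.1 s) (n - 1) + 1 with hkey
    set init := R.foldl (fun d i => d.insert (i + 1) ([] : List String)) PySem.Dict.empty with hinit
    set D := (PySem.List.enumerate tr 0).foldl
        (fun d p => d.modify (key p) [] (fun v => v ++ [p.2])) init with hD
    have hinit_items : init.items = R.map (fun i => (i + 1, ([] : List String))) :=
      pv_items_range_insert n _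
    have hinit_keys : init.keys = R.map (fun i => i + 1) := by
      show init.items.map (·.1) = _
      rw [hinit_items, List.map_map]
      rfl
    have hnodup : init.keys.Nodup := by
      rw [hinit_keys]
      apply List.Nodup.map
      · intro x y hxy; simp only at hxy; omega
      · exact PySem.List.nodup_pyRange_one 0 n
    have hkeysD : D.keys = init.keys := by
      rw [hD, PySem.Dict.keys_foldl_modify_key]
      rw [PySem.Set.update_eq_append_filter]
      have hnil : (PySem.Set.ofList ((PySem.List.enumerate tr 0).map key)).filter
          (fun y => !(PySem.Set.contains init.keys y)) = [] := by
        rw [List.filter_eq_nil_iff]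
        intro y hy
        have hy' : y ∈ (PySem.List.enumerate tr 0).map key := (PySem.Set.mem_ofList _ _).mp hy
        rcases List.mem_map.mp hy' with ⟨p, hp, rfl⟩
        have hb := pv_mem_enumerate_bounds tr 0 p hp
        have : key p ∈ init.keys := by
          rw [hinit_keys, hR, hkey]
          exact pv_key_mem n s p.1 hn hs (by omega)
        simpa [PySem.Set.contains_iff] using this
      rw [hnil, List.append_nil]
    have hnodupD : D.keys.Nodup := by rw [hkeysD]; exact hnodup
    have hgetD : ∀ c, D.getD c [] = init.getD c [] ++
        ((PySem.List.enumerate tr 0).filter (fun p => key p == c)).map (·.2) := by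
      intro c
      rw [hD]
      rw [← List.foldl_map (f := fun p : Int × String => (key p, p.2))
          (g := fun (d : PySem.Dict Int (List String)) q => d.modify q.1 [] (fun v => v ++ [q.2]))]
      rw [PySem.Dict.getD_foldl_modify_append]
      rw [List.filter_map, List.map_map]
      rfl
    have hinit_getD : ∀ i ∈ R, init.getD (i + 1) [] = [] := by
      intro i hi
      have hm : (i + 1, ([] : List String)) ∈ init.items := by
        rw [hinit_items]; exact List.mem_map.mpr ⟨i, hi, rfl⟩
      exact PySem.Dict.getD_of_mem_items init hm hnodup []
    rw [pv_items_range_insert n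
        (fun i => PySem.List.slice tr (some (i * s)) (some (if i < n - 1 then i * s + s else L)))]
    rw [PySem.Dict.items_eq_map_keys D hnodupD [], hkeysD, hinit_keys, List.map_map]
    apply List.map_congr_left
    intro i hi
    have hi' := PySem.List.mem_pyRange_one.mp (hR ▸ hi)
    simp only [Function.comp]
    refine Prod.ext rfl ?_
    show PySem.List.slice tr (some (i * s)) (some (if i < n - 1 then i * s + s else L)) = D.getD (i + 1) []
    rw [hgetD, hinit_getD i hi, List.nil_append]
    have his : 0 ≤ i * s := mul_nonneg (by omega) (by omega)
    by_cases hlast : i < n - 1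
    · rw [if_pos hlast]
      have hfc : List.filter (fun p => key p == i + 1) (PySem.List.enumerate tr 0)
          = List.filter (fun p => decide (i * s ≤ p.1 ∧ p.1 < i * s + s))
              (PySem.List.enumerate tr 0) :=
        List.filter_congr (fun p _ => pv_pred_interval n s i p.1 hs (by omega) hlast)
      rw [hfc, pv_enum_filter_interval tr 0 (i * s) (i * s + s)]
      rw [PySem.List.slice_toNat tr (by exact his) (by linarith)]
      obtain ⟨a, ha⟩ : ∃ a, i * s = a := ⟨_, rfl⟩
      have ha0 : 0 ≤ a := ha ▸ his
      rw [ha]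
      rw [show (a + s - max a 0).toNat = (a + s).toNat - a.toNat from by omega,
          show (a - 0).toNat = a.toNat from by omega]
    · have hieq : i = n - 1 := by omega
      rw [if_neg hlast]
      subst hieq
      have hfc : List.filter (fun p => key p == (n - 1) + 1) (PySem.List.enumerate tr 0)
          = List.filter (fun p => decide ((n - 1) * s ≤ p.1)) (PySem.List.enumerate tr 0) :=
        List.filter_congr (fun p _ => pv_pred_last n s p.1 hs hn)
      rw [hfc, pv_enum_filter_ge tr 0 ((n - 1) * s)]
      rw [PySem.List.slice_toNat tr (by exact his) (by omega)]
      obtain ⟨a, ha⟩ : ∃ a, (n - 1) * s = a := ⟨_, rfl⟩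
      have ha0 : 0 ≤ a := ha ▸ his
      rw [ha]
      rw [show (a - 0).toNat = a.toNat from by omega]
      apply List.take_of_length_le
      rw [List.length_drop]
      omega
  · have hneg : n < 0 := by
      rcases lt_or_ge n 0 with h | h
      · exact h
      · exact absurd (by omega : n = 0) hpre
    rw [if_neg hn, PySem.List.pyRange_one_eq_nil (by omega)]
    simp
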